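-- pv_equiv track=rewrite | github.com/luis19fer97/ST0245-032 | laboratorios/lab02/ejercicioEnLinea/Array3.py | countclumps
-- ===== SOURCE A (Python) =====
-- def countclumps(array):
--   cont = 0
--   aux = None
--   for i in range(1,len(array)):
--     if array[i]==array[i-1]:
--       aux = array[i]
--       if i+1 == len(array) and aux!=None:
--         cont = cont + 1
--     else:
--       if aux != None and array[i]!=array[i-1]:
--         cont = cont + 1
--         aux = None
--   return cont
-- ===== SOURCE B (Python) =====
-- def countclumps(array):
--     n = len(array)
--     return sum(1 for i in range(1, n)
--                if array[i] == array[i - 1] and (i == 1 or array[i - 2] != array[i - 1]))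
-- ===== Notes on version B (the rewrite author's own statement) =====
-- stated objective: simpler
-- what changed: Replaced A's stateful aux/cont automaton with its end-of-array special case by a stateless one-line comprehension counting run starts (indices i with array[i]==array[i-1] and no equal pair immediately before).
import Mathlib
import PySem

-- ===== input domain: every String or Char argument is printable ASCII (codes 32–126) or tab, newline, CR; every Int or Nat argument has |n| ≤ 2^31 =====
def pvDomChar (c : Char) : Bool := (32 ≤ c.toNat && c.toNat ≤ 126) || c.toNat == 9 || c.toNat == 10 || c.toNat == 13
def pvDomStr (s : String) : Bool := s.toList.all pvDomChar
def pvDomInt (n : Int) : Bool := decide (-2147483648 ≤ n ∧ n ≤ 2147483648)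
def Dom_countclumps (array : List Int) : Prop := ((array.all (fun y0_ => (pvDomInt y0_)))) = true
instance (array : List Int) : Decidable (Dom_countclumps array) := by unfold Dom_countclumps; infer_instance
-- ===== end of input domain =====

-- B replaces A's stateful aux/cont automaton (with its end-of-array special case) by a
-- stateless comprehension counting run starts; objective: simpler.

-- ===== PORT A =====
-- loop body of A's 'for i in range(1, len(array))': state is (cont, aux)
def countclumpsStep (array : List Int) (st : Int × Option Int) (i : Int) : Int × Option Int :=
  let cont := st.1
  let aux := st.2
  if PySem.List.pyGetD array i 0 == PySem.List.pyGetD array (i - 1) 0 then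
    let aux := some (PySem.List.pyGetD array i 0)
    if i + 1 == (array.length : Int) && aux.isSome then (cont + 1, aux) else (cont, aux)
  else
    if aux.isSome && !(PySem.List.pyGetD array i 0 == PySem.List.pyGetD array (i - 1) 0) then
      (cont + 1, (none : Option Int))
    else (cont, aux)

def countclumps (array : List Int) : Int :=
  ((PySem.List.pyRange 1 (array.length : Int) 1).foldl (countclumpsStep array) (0, none)).1

-- ===== PORT B =====
-- the 0/1 indicator of the comprehension's condition at index i
def countclumpsInd (array : List Int) (i : Int) : Int :=
  if (PySem.List.pyGetD array i 0 == PySem.List.pyGetD array (i - 1) 0)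
      && (i == 1 || !(PySem.List.pyGetD array (i - 2) 0 == PySem.List.pyGetD array (i - 1) 0)) then
    1
  else 0

def countclumps_alt (array : List Int) : Int :=
  ((PySem.List.pyRange 1 (array.length : Int) 1).map (countclumpsInd array)).sum

-- ===== PRECONDITION & SPEC =====
def Spec_countclumps (array : List Int) (out : Int) : Prop := out = countclumps_alt array
instance (array : List Int) (out : Int) : Decidable (Spec_countclumps array out) := by unfold Spec_countclumps; infer_instance

-- ===== CLAIM (what is proved, stated in full; the proofs are below) =====
def Claim_equal_countclumps : Prop := ∀ (array : List Int), Dom_countclumps array → Spec_countclumps array (countclumps array)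

-- ===== LEMMAS AND PROOFS =====

-- invariant of A's loop: starting at index i with a consistent aux, the final cont equals
-- the running count, plus one for the pending (not yet counted) open run, plus B's count
-- of run starts over the remaining indices.
theorem countclumps_loop (xs : List Int) (k : Nat) :
    ∀ (i c : Int) (aux : Option Int), 1 ≤ i → i + k = (xs.length : Int) - 1 →
      (aux.isSome = decide (2 ≤ i ∧ PySem.List.pyGetD xs (i - 1) 0 = PySem.List.pyGetD xs (i - 2) 0)) →
      ((PySem.List.pyRange i (xs.length : Int) 1).foldl (countclumpsStep xs) (c, aux)).1
        = c + (if aux.isSome then 1 else 0)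
            + ((PySem.List.pyRange i (xs.length : Int) 1).map (countclumpsInd xs)).sum := by
  induction k with
  | zero =>
    intro i c aux h1 hk haux
    have hn : (xs.length : Int) = i + 1 := by omega
    rw [hn, PySem.List.pyRange_one_singleton]
    simp only [List.foldl_cons, List.foldl_nil, List.map_cons, List.map_nil,
      List.sum_cons, List.sum_nil]
    by_cases heq : PySem.List.pyGetD xs i 0 = PySem.List.pyGetD xs (i - 1) 0
    · have hstep : (countclumpsStep xs (c, aux) i).1 = c + 1 := by
        simp [countclumpsStep, heq, hn]
      rw [hstep]
      by_cases hpend : 2 ≤ i ∧ PySem.List.pyGetD xs (i - 1) 0 = PySem.List.pyGetD xs (i - 2) 0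
      · have hs : aux.isSome = true := by rw [haux]; simp [hpend]
        have hind : countclumpsInd xs i = 0 := by
          simp [countclumpsInd, heq, hpend.2.symm]
          omega
        rw [hind]; simp [hs]
      · have hs : aux.isSome = false := by
          rw [haux]; simp; intro h2 hc; exact absurd ⟨h2, hc⟩ hpend
        have hind : countclumpsInd xs i = 1 := by
          rcases Decidable.em (i = 1) with h1' | h1'
          · rw [h1'] at heq ⊢
            simp [countclumpsInd, heq]
          · have h2 : 2 ≤ i := by omega
            have hne : ¬ PySem.List.pyGetD xs (i - 2) 0 = PySem.List.pyGetD xs (i - 1) 0 :=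
              fun hc => hpend ⟨h2, hc.symm⟩
            simp [countclumpsInd, heq, h1', hne]
        rw [hind]; simp [hs]
    · have hstep : (countclumpsStep xs (c, aux) i).1 = if aux.isSome then c + 1 else c := by
        by_cases hs : aux.isSome = true
        · simp [countclumpsStep, heq, hs]
        · have hs' : aux.isSome = false := by simpa using hs
          simp [countclumpsStep, heq, hs']
      rw [hstep]
      have hind : countclumpsInd xs i = 0 := by simp [countclumpsInd, heq]
      rw [hind]
      by_cases hs : aux.isSome = true
      · simp [hs]
      · have hs' : aux.isSome = false := by simpa using hs
        simp [hs']
  | succ k ih =>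
    intro i c aux h1 hk haux
    have hlt : i < (xs.length : Int) := by omega
    rw [PySem.List.pyRange_one_cons hlt]
    simp only [List.foldl_cons, List.map_cons, List.sum_cons]
    by_cases heq : PySem.List.pyGetD xs i 0 = PySem.List.pyGetD xs (i - 1) 0
    · have hni : ¬ (i + 1 = (xs.length : Int)) := by omega
      have hstep : countclumpsStep xs (c, aux) i = (c, some (PySem.List.pyGetD xs i 0)) := by
        simp [countclumpsStep, heq, hni]
      rw [hstep]
      have haux' : (some (PySem.List.pyGetD xs i 0)).isSome
          = decide (2 ≤ i + 1 ∧ PySem.List.pyGetD xs (i + 1 - 1) 0 = PySem.List.pyGetD xs (i + 1 - 2) 0) := by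
        have : i + 1 - 1 = i := by ring
        have h2 : i + 1 - 2 = i - 1 := by ring
        simp [this, h2, heq]
        omega
      have := ih (i + 1) c (some (PySem.List.pyGetD xs i 0)) (by omega) (by omega) haux'
      rw [this]
      by_cases hpend : 2 ≤ i ∧ PySem.List.pyGetD xs (i - 1) 0 = PySem.List.pyGetD xs (i - 2) 0
      · have hs : aux.isSome = true := by rw [haux]; simp [hpend]
        simp [countclumpsInd, heq, hs, hpend]
        omega
      · have hs : aux.isSome = false := by
          rw [haux]; simp; intro h2 hc; exact absurd ⟨h2, hc⟩ hpend
        simp [countclumpsInd, heq, hs]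
        rcases Decidable.em (i = 1) with h1' | h1'
        · simp [h1']; omega
        · have h2 : 2 ≤ i := by omega
          have hne : ¬ PySem.List.pyGetD xs (i - 1) 0 = PySem.List.pyGetD xs (i - 2) 0 := fun hc => hpend ⟨h2, hc⟩
          simp [h1']
          omega
    · have hstep : countclumpsStep xs (c, aux) i
          = ((if aux.isSome then c + 1 else c), (if aux.isSome then none else aux)) := by
        by_cases hs : aux.isSome = true
        · simp [countclumpsStep, heq, hs]
        · have hs' : aux.isSome = false := by simpa using hs
          simp [countclumpsStep, heq, hs']
      rw [hstep]
      have haux' : (if aux.isSome then (none : Option Int) else aux).isSome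
          = decide (2 ≤ i + 1 ∧ PySem.List.pyGetD xs (i + 1 - 1) 0 = PySem.List.pyGetD xs (i + 1 - 2) 0) := by
        have e1 : i + 1 - 1 = i := by ring
        have e2 : i + 1 - 2 = i - 1 := by ring
        by_cases hs : aux.isSome = true
        · simp [hs, e1, e2, heq]
        · have hs' : aux.isSome = false := by simpa using hs
          simp [hs', e1, e2, heq]
      have := ih (i + 1) (if aux.isSome then c + 1 else c) (if aux.isSome then none else aux) (by omega) (by omega) haux'
      rw [this]
      have hind : countclumpsInd xs i = 0 := by simp [countclumpsInd, heq]
      rw [hind]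
      by_cases hs : aux.isSome = true
      · simp [hs]
      · have hs' : aux.isSome = false := by simpa using hs
        simp [hs']

-- ===== VERDICT (by name: the statement is the Claim_ definition above) =====
theorem countclumps_spec : Claim_equal_countclumps := by
  unfold Claim_equal_countclumps
  intro array _
  unfold Spec_countclumps countclumps countclumps_alt
  by_cases hn : (array.length : Int) ≤ 1
  · rw [PySem.List.pyRange_one_eq_nil hn]
    simp
  · have h := countclumps_loop array ((array.length : Int) - 2).toNat 1 0 none
      (by omega) (by omega) (by simp)
    rw [h]
    simp
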